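-- pv_equiv track=rewrite | github.com/LPRowe/coding-interview-practice | arcade/intro-problems/medium/fileNaming.py | fileNaming
-- ===== SOURCE A (Python) =====
-- def fileNaming(names):
--
--     #Iterate through names and check to see if name is pre-existing (at an earlier index)
--     index=0
--     for name in names:
--         count=0
--         if name in names[:index]:
--             #Since a name is preexisting, count how many times it pre-exists
--             count+=names[:index].count(name)
--             while names[index]+'('+str(count)+')' in names[:index]:
--                 count+=1
--
--             #update the files name
--             names[index]=names[index]+'('+str(count)+')'
--         index+=1
--
--     return(names)
-- ===== SOURCE B (Python) =====
-- # B: union-find style suffix allocation with path compression. Instead of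
-- # linearly probing consecutive suffixes against the prefix (A's rescans), B
-- # keeps a hash set of used names plus a parent-pointer forest mapping an
-- # occupied slot (base, k) to the next candidate slot to try; find follows and
-- # then compresses the pointer chain, so repeated collisions on the same base
-- # jump straight past previously-probed runs. Unlike A, B does not mutate the
-- # input list; equivalence is about the return value only.
-- def fileNaming(names):
--     used = set()
--     parent = {}
--     out = []
--     for name in names:
--         if name in used:
--             k, path = 1, []
--             while name + '(' + str(k) + ')' in used:
--                 path.append(k)
--                 k = parent.get((name, k), k + 1)
--             for p in path:
--                 parent[(name, p)] = k
--             name = name + '(' + str(k) + ')'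
--         used.add(name)
--         out.append(name)
--     return out
-- ===== Notes on version B (the rewrite author's own statement) =====
-- stated objective: faster
-- what changed: B replaces A's linear probing of consecutive suffixes against growing list-prefix slices with a union-find parent-pointer forest over (base,k) slots with path compression, plus a hash set of used names; a collision follows compressed pointer jumps instead of rescanning suffix runs, and B builds a fresh output list instead of mutating the input.
import Mathlib
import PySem

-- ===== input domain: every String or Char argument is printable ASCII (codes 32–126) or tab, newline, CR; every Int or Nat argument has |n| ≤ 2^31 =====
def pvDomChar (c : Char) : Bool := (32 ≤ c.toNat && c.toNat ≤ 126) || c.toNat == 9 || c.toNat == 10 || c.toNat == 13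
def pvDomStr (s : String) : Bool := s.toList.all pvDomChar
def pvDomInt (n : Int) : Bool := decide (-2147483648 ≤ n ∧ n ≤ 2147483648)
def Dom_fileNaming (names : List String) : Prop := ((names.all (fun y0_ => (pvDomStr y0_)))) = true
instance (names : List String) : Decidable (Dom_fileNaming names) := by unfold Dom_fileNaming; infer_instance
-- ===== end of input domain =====

-- B allocates the smallest unused "(k)" suffix through a union-find parent-pointer forest over
-- (base, k) slots with path compression plus a used-name set, instead of A's linear probing
-- against prefix slices; A mutates its input list in place and returns it, B builds a fresh
-- list — the equivalence proved is about the return value.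


-- ===== PORT A =====
-- name + '(' + str(c) + ')'  (this expression appears verbatim in both Pythons)
def pvCand (name : String) (c : Int) : String := name ++ "(" ++ PySem.Int.toStr c ++ ")"

-- A's 'while names[index]+'('+str(count)+')' in names[:index]: count += 1' loop;
-- fuel = len(prefix)+1 bounds the iteration count (the candidate strings are pairwise distinct)
def probeA (pref : List String) (name : String) : Int → Nat → Int
  | count, 0 => count
  | count, fuel+1 =>
      if pvCand name count ∈ pref then probeA pref name (count + 1) fuel else count

-- A's 'for name in names' loop, mutating the list at the current index
def goA : List String → Nat → Nat → List String
  | names, _, 0 => names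
  | names, index, fuel+1 =>
      let names' :=
        match names[index]? with
        | none => names
        | some name =>
            let pref := names.take index
            if name ∈ pref then
              let count : Int := (pref.count name : Nat)
              let count := probeA pref name count (pref.length + 1)
              names.set index (pvCand name count)
            else names
      goA names' (index + 1) fuel

def fileNaming (names : List String) : List String := goA names 0 names.length

-- ===== PORT B =====
-- B's 'while name + '(' + str(k) + ')' in used: path.append(k); k = parent.get((name,k), k+1)'
-- loop, returning the free slot and the visited path; fuel = len(used)+1 bounds the iterations
-- (the visited slots are strictly increasing occupied slots, hence distinct members of used)
def findB (used : PySem.Set String) (parent : PySem.Dict (String × Int) Int) (name : String) :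
    Int → List Int → Nat → Int × List Int
  | k, path, 0 => (k, path)
  | k, path, fuel+1 =>
      if PySem.Set.contains used (pvCand name k) then
        findB used parent name (parent.getD (name, k) (k + 1)) (path ++ [k]) fuel
      else (k, path)

-- B's single pass: used set, parent-pointer forest (with the 'for p in path' compression fold),
-- output accumulator
def goB : List String → PySem.Set String → PySem.Dict (String × Int) Int → List String → List String
  | [], _, _, out => out
  | name :: rest, used, parent, out =>
      if PySem.Set.contains used name then
        let r := findB used parent name 1 [] (used.length + 1)
        let parent' := r.2.foldl (fun d p => d.insert (name, p) r.1) parent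
        goB rest (PySem.Set.add used (pvCand name r.1)) parent' (out ++ [pvCand name r.1])
      else
        goB rest (PySem.Set.add used name) parent (out ++ [name])

def fileNaming_alt (names : List String) : List String :=
  goB names PySem.Set.empty PySem.Dict.empty []

-- ===== PRECONDITION & SPEC =====
def Spec_fileNaming (names : List String) (out : List String) : Prop := out = fileNaming_alt names
instance (names : List String) (out : List String) : Decidable (Spec_fileNaming names out) := by unfold Spec_fileNaming; infer_instance

-- ===== CLAIM (what is proved, stated in full; the proofs are below) =====
def Claim_equal_fileNaming : Prop := ∀ (names : List String), Dom_fileNaming names → Spec_fileNaming names (fileNaming names)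

-- ===== LEMMAS AND PROOFS =====

-- decoding the decimal digit characters of a Nat recovers it (gives injectivity of str(n))
def pvVal (l : List Char) : Nat := l.foldl (fun a c => a * 10 + (c.toNat - 48)) 0

theorem pvToDigitsCore_append : ∀ (f n : Nat) (ds : List Char),
    Nat.toDigitsCore 10 f n ds = Nat.toDigitsCore 10 f n [] ++ ds := by
  intro f
  induction f with
  | zero => intro n ds; simp [Nat.toDigitsCore]
  | succ f ih =>
    intro n ds
    simp only [Nat.toDigitsCore]
    by_cases h : n / 10 = 0
    · simp [h]
    · simp only [h, if_false]
      rw [ih (n/10) ((n % 10).digitChar :: ds), ih (n/10) [(n % 10).digitChar]]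
      simp

theorem pvToDigitsCore_fuel : ∀ (n : Nat) (f : Nat) (ds : List Char), n < f →
    Nat.toDigitsCore 10 f n ds = Nat.toDigitsCore 10 (n + 1) n ds := by
  intro n
  induction n using Nat.strong_induction_on with
  | _ n ih =>
    intro f ds hf
    match f, hf with
    | f+1, _ =>
      simp only [Nat.toDigitsCore]
      by_cases h : n / 10 = 0
      · simp [h]
      · simp only [h, if_false]
        have hlt : n / 10 < n := Nat.div_lt_self (by omega) (by omega)
        rw [ih (n/10) hlt f ((n % 10).digitChar :: ds) (by omega),
            ih (n/10) hlt n ((n % 10).digitChar :: ds) (by omega)]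

theorem pvDigitChar_val (d : Nat) (h : d < 10) : (Nat.digitChar d).toNat - 48 = d := by
  interval_cases d <;> decide

theorem pvVal_toDigits (n : Nat) : pvVal (Nat.toDigits 10 n) = n := by
  induction n using Nat.strong_induction_on with
  | _ n ih =>
    unfold Nat.toDigits
    simp only [Nat.toDigitsCore]
    by_cases h : n / 10 = 0
    · have hn : n < 10 := by omega
      have hmod : n % 10 = n := Nat.mod_eq_of_lt hn
      simp [h, hmod, pvVal, pvDigitChar_val n hn]
    · simp only [h, if_false]
      have hlt : n / 10 < n := Nat.div_lt_self (by omega) (by omega)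
      rw [pvToDigitsCore_fuel (n/10) n _ hlt, pvToDigitsCore_append]
      show pvVal (Nat.toDigits 10 (n/10) ++ [(n % 10).digitChar]) = n
      have := ih (n/10) hlt
      simp only [pvVal, List.foldl_append] at *
      simp [this, pvDigitChar_val (n % 10) (Nat.mod_lt _ (by omega))]
      omega

theorem pvToChars_inj {m n : Int} (hm : 0 ≤ m) (hn : 0 ≤ n)
    (h2 : PySem.Int.toChars m = PySem.Int.toChars n) : m = n := by
  unfold PySem.Int.toChars at h2
  rw [if_neg (by omega), if_neg (by omega)] at h2
  have := congrArg pvVal h2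
  rw [pvVal_toDigits, pvVal_toDigits] at this
  omega

theorem pvCand_inj {name : String} {c c' : Int} (hc : 0 ≤ c) (hc' : 0 ≤ c')
    (h : pvCand name c = pvCand name c') : c = c' := by
  apply pvToChars_inj hc hc'
  have h2 := congrArg String.toList h
  simp only [pvCand, String.toList_append, PySem.Int.toList_toStr, List.append_assoc] at h2
  have h3 := List.append_cancel_left h2
  simp only [String.toList] at h3
  have h4 : PySem.Int.toChars c ++ [')'] = PySem.Int.toChars c' ++ [')'] := by
    simpa using h3
  exact List.append_cancel_right h4

-- pigeonhole: within len(S)+1 tries some candidate suffix is unused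
theorem pvExists_free (S : List String) (name : String) (s : Int) (hs : 1 ≤ s) :
    ∃ d : Nat, d < S.length + 1 ∧ pvCand name (s + d) ∉ S := by
  by_contra hcon
  push Not at hcon
  set L : List String := (List.range (S.length + 1)).map (fun d : Nat => pvCand name (s + (d : Int))) with hL
  have hnodup : L.Nodup := by
    refine List.Nodup.map_on ?_ (List.nodup_range)
    intro x hx y hy hxy
    have hx0 : (0:Int) ≤ s + (x:Int) := by positivity
    have hy0 : (0:Int) ≤ s + (y:Int) := by positivity
    have := pvCand_inj hx0 hy0 hxy
    omega
  have hsub : ∀ x ∈ L, x ∈ S := by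
    intro x hx
    rw [hL, List.mem_map] at hx
    obtain ⟨d, hd, rfl⟩ := hx
    exact hcon d (by simpa using hd)
  have h1 : L.toFinset.card = S.length + 1 := by
    rw [List.toFinset_card_of_nodup hnodup, hL]; simp
  have h2 : L.toFinset ⊆ S.toFinset := by
    intro x hx; rw [List.mem_toFinset] at *; exact hsub x hx
  have h3 := Finset.card_le_card h2
  have h4 := S.toFinset_card_le
  omega

-- A's probe loop returns the least free candidate at or above its start
theorem probeA_char (S : List String) (name : String) :
    ∀ (fuel : Nat) (s : Int), (∃ d : Nat, d < fuel ∧ pvCand name (s + d) ∉ S) →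
      pvCand name (probeA S name s fuel) ∉ S ∧ s ≤ probeA S name s fuel ∧
        ∀ c, s ≤ c → c < probeA S name s fuel → pvCand name c ∈ S := by
  intro fuel
  induction fuel with
  | zero => intro s ⟨d, hd, _⟩; omega
  | succ fuel ih =>
    intro s ⟨d, hd, hfree⟩
    by_cases h : pvCand name s ∈ S
    · have hd0 : d ≠ 0 := by rintro rfl; simp at hfree; exact hfree (by simpa using h)
      have hex : ∃ d' : Nat, d' < fuel ∧ pvCand name (s + 1 + d') ∉ S := by
        refine ⟨d - 1, by omega, ?_⟩
        have heq : s + 1 + (↑(d - 1) : Int) = s + d := by omega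
        rw [heq]; exact hfree
      have := ih (s + 1) hex
      simp only [probeA, h, if_true]
      refine ⟨this.1, by omega, ?_⟩
      intro c hc1 hc2
      by_cases hcs : c = s
      · subst hcs; exact h
      · exact this.2.2 c (by omega) hc2
    · simp only [probeA]
      rw [if_neg h]
      exact ⟨h, le_refl _, by intro c h1 h2; omega⟩

-- invariant of the parent forest: an edge (b,k) ↦ k' jumps forward only over occupied slots
def pvInv (parent : PySem.Dict (String × Int) Int) (used : List String) : Prop :=
  ∀ b k k', parent.get? (b, k) = some k' →
    k < k' ∧ ∀ j : Int, k ≤ j → j < k' → pvCand b j ∈ used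

-- B's find: under the invariant, it returns the least free slot ≥ 1, and every slot it visits
-- (and later compresses) lies strictly below that slot
theorem findB_spec (used : List String) (parent : PySem.Dict (String × Int) Int) (name : String)
    (hinv : pvInv parent used) (kstar : Int)
    (hfree : pvCand name kstar ∉ used)
    (hbelow : ∀ j : Int, 1 ≤ j → j < kstar → pvCand name j ∈ used) :
    ∀ (fuel : Nat) (k : Int) (path : List Int), 1 ≤ k → k ≤ kstar → (kstar - k).toNat < fuel →
      (findB used parent name k path fuel).1 = kstar ∧
      ∀ p ∈ (findB used parent name k path fuel).2, p ∈ path ∨ (1 ≤ p ∧ p < kstar) := by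
  intro fuel
  induction fuel with
  | zero => intro k path _ _ hf; omega
  | succ fuel ih =>
    intro k path hk1 hkle hf
    by_cases h : pvCand name k ∈ used
    · have hklt : k < kstar := by
        rcases lt_or_eq_of_le hkle with h' | h'
        · exact h'
        · exact absurd (h' ▸ h) hfree
      have hnext : k < parent.getD (name, k) (k + 1) ∧ parent.getD (name, k) (k + 1) ≤ kstar := by
        rcases hget : parent.get? (name, k) with _ | k''
        · rw [PySem.Dict.getD_eq_get?_getD, hget]; simp; omega
        · rw [PySem.Dict.getD_eq_get?_getD, hget]; simp only [Option.getD_some]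
          have hi := hinv name k k'' hget
          refine ⟨hi.1, ?_⟩
          by_contra hcon
          exact hfree (hi.2 kstar (by omega) (by omega))
      simp only [findB, (PySem.Set.contains_iff used _).mpr h, if_true]
      have := ih (parent.getD (name, k) (k + 1)) (path ++ [k]) (by omega) hnext.2 (by omega)
      refine ⟨this.1, ?_⟩
      intro p hp
      rcases this.2 p hp with hp' | hp'
      · rcases List.mem_append.mp hp' with hp'' | hp''
        · exact Or.inl hp''
        · simp at hp''; subst hp''; exact Or.inr ⟨hk1, hklt⟩
      · exact Or.inr hp'
    · have hkeq : k = kstar := by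
        by_contra hne
        exact h (hbelow k hk1 (by omega))
      simp only [findB]
      rw [if_neg (by rw [PySem.Set.contains_iff]; exact h)]
      exact ⟨hkeq, fun p hp => Or.inl hp⟩

-- every binding of the compression fold is either an old binding or (name, p) ↦ v with p ∈ path
theorem pvGet?_foldl_insert (name : String) (v : Int) :
    ∀ (l : List Int) (d : PySem.Dict (String × Int) Int) (key : String × Int) (k' : Int),
      (l.foldl (fun d p => d.insert (name, p) v) d).get? key = some k' →
      d.get? key = some k' ∨ ∃ p ∈ l, key = (name, p) ∧ k' = v := by
  intro l
  induction l with
  | nil => intro d key k' h; exact Or.inl h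
  | cons p l ih =>
    intro d key k' h
    rcases ih (d.insert (name, p) v) key k' h with h' | h'
    · rw [PySem.Dict.get?_insert] at h'
      split_ifs at h' with hkey
      · exact Or.inr ⟨p, by simp, hkey, by injection h'; omega⟩
      · exact Or.inl h'
    · obtain ⟨q, hq, hk, hv⟩ := h'
      exact Or.inr ⟨q, List.mem_cons_of_mem _ hq, hk, hv⟩

-- main invariant: A's in-place pass over out ++ rest agrees with B's pass over rest, where out
-- is both the already-renamed prefix and B's used set, and the parent forest satisfies pvInv
theorem pvMain : ∀ (rest out : List String) (parent : PySem.Dict (String × Int) Int),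
    out.Nodup → pvInv parent out →
    goA (out ++ rest) out.length rest.length = goB rest out parent out := by
  intro rest
  induction rest with
  | nil => intro out parent _ _; simp [goA, goB]
  | cons name rest ih =>
    intro out parent hnd hinv
    have hget : (out ++ name :: rest)[out.length]? = some name := by
      rw [List.getElem?_append_right (le_refl _)]; simp
    have htake : (out ++ name :: rest).take out.length = out := List.take_left
    simp only [List.length_cons, goA, goB, hget, htake]
    by_cases hm : name ∈ out
    · rw [if_pos hm, if_pos ((PySem.Set.contains_iff _ _).mpr hm)]
      have hcount : ((out.count name : Nat) : Int) = 1 := by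
        rw [List.count_eq_one_of_mem hnd hm]; rfl
      rw [hcount]
      set cA := probeA out name 1 (out.length + 1) with hcA
      have chA := probeA_char out name (out.length + 1) 1 (pvExists_free out name 1 (by omega))
      -- cA ≤ out.length + 1, so the fuel out.length + 1 suffices for findB
      have hcAbound : cA ≤ (out.length : Int) + 1 := by
        obtain ⟨d, hd, hfr⟩ := pvExists_free out name 1 (by omega)
        by_contra hcon
        exact hfr (chA.2.2 (1 + d) (by omega) (by omega))
      have hfs := findB_spec out parent name hinv cA chA.1
        (fun j h1 h2 => chA.2.2 j h1 h2)
        (out.length + 1) 1 [] (le_refl _) chA.2.1 (by omega)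
      rw [hfs.1]
      have hset : (out ++ name :: rest).set out.length (pvCand name cA) =
          (out ++ [pvCand name cA]) ++ rest := by
        rw [List.set_append]; simp
      rw [hset]
      have hnotmem : pvCand name cA ∉ out := chA.1
      have hlen2 : out.length + 1 = (out ++ [pvCand name cA]).length := by simp
      rw [hlen2, PySem.Set.add_of_not_mem hnotmem]
      apply ih
      · simp [List.nodup_append, hnd]
        intro a ha h; exact hnotmem (h ▸ ha)
      · intro b k k' h
        rcases pvGet?_foldl_insert name cA _ parent (b, k) k' h with h' | h'
        · have hi := hinv b k k' h'
          exact ⟨hi.1, fun j h1 h2 => List.mem_append_left _ (hi.2 j h1 h2)⟩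
        · obtain ⟨p, hp, hk, hv⟩ := h'
          rw [Prod.mk.injEq] at hk
          obtain ⟨rfl, rfl⟩ := hk
          subst hv
          have hp2 : k ∈ (findB out parent b 1 [] (out.length + 1)).2 := by
            simpa using hp
          rcases hfs.2 _ hp2 with hp' | hp'
          · simp at hp'
          · exact ⟨hp'.2, fun j h1 h2 =>
              List.mem_append_left _ (chA.2.2 j (by omega) h2)⟩
    · rw [if_neg hm, if_neg (by rw [PySem.Set.contains_iff]; exact hm)]
      have heq : out ++ name :: rest = (out ++ [name]) ++ rest := by simp
      have hlen2 : out.length + 1 = (out ++ [name]).length := by simp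
      rw [heq, hlen2, PySem.Set.add_of_not_mem hm]
      apply ih
      · simp [List.nodup_append, hnd]
        intro a ha h; exact hm (h ▸ ha)
      · intro b k k' h
        have hi := hinv b k k' h
        exact ⟨hi.1, fun j h1 h2 => List.mem_append_left _ (hi.2 j h1 h2)⟩

-- ===== VERDICT (by name: the statement is the Claim_ definition above) =====
theorem fileNaming_spec : Claim_equal_fileNaming := by
  intro names _
  unfold Spec_fileNaming fileNaming fileNaming_alt
  have h := pvMain names [] PySem.Dict.empty (by simp)
    (by intro b k k' h; rw [PySem.Dict.get?_empty] at h; exact absurd h (by simp))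
  simpa using h
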